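-- pv_equiv track=rewrite | github.com/thomast8/auto-scientist | src/auto_scientist/agents/notebook_query.py | build_status
-- ===== SOURCE A (Python) =====
-- from typing import Any
--
-- KNOWN_SOURCES: tuple[str, ...] = (
--     "ingestor",
--     "scientist",
--     "revision",
--     "stop_gate",
--     "stop_revision",
-- )
--
-- def build_status(entries: list[dict[str, Any]]) -> str:
--     """Build a counts-only status summary (no TOC, since TOC is inline in prompt)."""
--     by_source: dict[str, int] = {}
--     for entry in entries:
--         src = entry.get("source", "")
--         by_source[src] = by_source.get(src, 0) + 1
--
--     lines = [f"Total: {len(entries)} notebook entries"]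
--     for src in KNOWN_SOURCES:
--         count = by_source.get(src, 0)
--         if count:
--             lines.append(f"  {src}: {count}")
--     for src, count in sorted(by_source.items()):
--         if src not in KNOWN_SOURCES and count:
--             lines.append(f"  {src}: {count}")
--     return "\n".join(lines)
-- ===== SOURCE B (Python) =====
-- KNOWN_SOURCES: tuple[str, ...] = (
--     "ingestor",
--     "scientist",
--     "revision",
--     "stop_gate",
--     "stop_revision",
-- )
--
-- def build_status(entries):
--     """Counts-only status summary: one composite-key sorted pass instead of two output loops."""
--     by_source = {}
--     for entry in entries:
--         src = entry.get("source", "")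
--         by_source[src] = by_source.get(src, 0) + 1
--     def rank(src):
--         return KNOWN_SOURCES.index(src) if src in KNOWN_SOURCES else len(KNOWN_SOURCES)
--     ordered = sorted(by_source.items(), key=lambda item: (rank(item[0]), item[0]))
--     return "\n".join(["Total: %d notebook entries" % len(entries)]
--                      + ["  %s: %d" % (src, count) for src, count in ordered])
-- ===== Notes on version B (the rewrite author's own statement) =====
-- stated objective: alternative
-- what changed: A's two output loops (known sources in tuple order, then a sorted pass over all items filtered to unknown sources) are replaced by a single sorted pass over the counter's items with a composite (rank-in-KNOWN_SOURCES, name) key, with the redundant nonzero-count guards dropped.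
import Mathlib
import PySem

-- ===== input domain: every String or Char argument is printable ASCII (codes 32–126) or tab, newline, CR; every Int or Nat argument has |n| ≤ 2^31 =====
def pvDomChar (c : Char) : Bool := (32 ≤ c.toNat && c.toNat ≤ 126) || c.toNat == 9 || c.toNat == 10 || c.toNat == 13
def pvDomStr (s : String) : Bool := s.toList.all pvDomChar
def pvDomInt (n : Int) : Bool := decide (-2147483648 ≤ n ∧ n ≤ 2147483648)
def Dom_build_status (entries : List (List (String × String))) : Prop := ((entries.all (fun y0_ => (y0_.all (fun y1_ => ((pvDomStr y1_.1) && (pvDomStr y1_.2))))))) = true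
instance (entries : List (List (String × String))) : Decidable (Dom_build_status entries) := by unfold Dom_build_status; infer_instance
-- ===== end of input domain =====

-- B replaces A's two output loops (known sources, then sorted leftovers) by ONE sorted pass over the
-- counter's items with a composite (rank, name) key; same return value, different decomposition.

def KNOWN_SOURCES : List String :=
  ["ingestor", "scientist", "revision", "stop_gate", "stop_revision"]

-- ===== PORT A =====
def build_status (entries : List (List (String × String))) : String :=
  let by_source : PySem.Dict String Int :=
    entries.foldl (fun d entry =>
      let src := (PySem.Dict.mk entry).getD "source" ""
      d.insert src (d.getD src 0 + 1)) PySem.Dict.empty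
  let lines : List String := ["Total: " ++ PySem.Int.toStr (entries.length : Int) ++ " notebook entries"]
  let lines := KNOWN_SOURCES.foldl (fun ls src =>
      let count := by_source.getD src 0
      if count ≠ 0 then ls ++ ["  " ++ src ++ ": " ++ PySem.Int.toStr count] else ls) lines
  let lines := (PySem.List.sorted2 by_source.items (fun it => it.1) (fun it => it.2)).foldl
      (fun ls it =>
        if ¬ KNOWN_SOURCES.contains it.1 ∧ it.2 ≠ 0
        then ls ++ ["  " ++ it.1 ++ ": " ++ PySem.Int.toStr it.2] else ls) lines
  PySem.Str.join "\n" lines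

-- ===== PORT B =====
-- helper: Python's local `rank` (KNOWN_SOURCES.index(src) if src in KNOWN_SOURCES else len(KNOWN_SOURCES))
def rankB (src : String) : Int :=
  if KNOWN_SOURCES.contains src
  then (((PySem.List.index? KNOWN_SOURCES src).getD 0 : Nat) : Int)
  else (KNOWN_SOURCES.length : Int)

def build_status_alt (entries : List (List (String × String))) : String :=
  let by_source : PySem.Dict String Int :=
    entries.foldl (fun d entry =>
      let src := (PySem.Dict.mk entry).getD "source" ""
      d.insert src (d.getD src 0 + 1)) PySem.Dict.empty
  let ordered := PySem.List.sorted2 by_source.items (fun it => rankB it.1) (fun it => it.1)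
  PySem.Str.join "\n"
    (("Total: " ++ PySem.Int.toStr (entries.length : Int) ++ " notebook entries")
      :: ordered.map (fun it => "  " ++ it.1 ++ ": " ++ PySem.Int.toStr it.2))

-- ===== PRECONDITION & SPEC =====
def Spec_build_status (entries : List (List (String × String))) (out : String) : Prop := out = build_status_alt entries
instance (entries : List (List (String × String))) (out : String) : Decidable (Spec_build_status entries out) := by unfold Spec_build_status; infer_instance

-- ===== CLAIM (what is proved, stated in full; the proofs are below) =====
def Claim_equal_build_status : Prop := ∀ (entries : List (List (String × String))), Dom_build_status entries → Spec_build_status entries (build_status entries)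

-- ===== LEMMAS AND PROOFS =====

-- A two-key Python sort is the one-key sort under the lexicographic order on the key pair.
theorem sorted2_eq_sorted_lex {α κ₁ κ₂ : Type} [LinearOrder κ₁] [LinearOrder κ₂]
    (xs : List α) (k1 : α → κ₁) (k2 : α → κ₂) :
    PySem.List.sorted2 xs k1 k2 = PySem.List.sorted xs (fun x => toLex (k1 x, k2 x)) := by
  rw [PySem.List.sorted_eq_foldl_insertBy]
  show List.foldl (fun acc x => PySem.List.insertBy
      (fun a b => decide (k1 a < k1 b) || (!decide (k1 b < k1 a) && decide (k2 a < k2 b))) x acc) [] xs = _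
  have hfun : (fun a b => decide (k1 a < k1 b) || (!decide (k1 b < k1 a) && decide (k2 a < k2 b)))
      = (fun a b => decide (toLex ((k1 a), (k2 a)) < toLex ((k1 b), (k2 b)))) := by
    funext a b
    by_cases h1 : k1 a < k1 b
    · simp [h1, lt_asymm h1, Prod.Lex.toLex_lt_toLex]
    · by_cases h2 : k1 b < k1 a
      · simp [h1, h2, Prod.Lex.toLex_lt_toLex, ne_of_gt h2]
      · have heq : k1 a = k1 b := le_antisymm (not_lt.mp h2) (not_lt.mp h1)
        simp [heq, Prod.Lex.toLex_lt_toLex]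
  rw [hfun]

theorem foldl_append_ite {α β : Type} (p : α → Prop) [DecidablePred p] (f : α → β)
    (l : List α) (acc : List β) :
    l.foldl (fun acc x => if p x then acc ++ [f x] else acc) acc
      = acc ++ (l.filter (fun x => decide (p x))).map f := by
  induction l generalizing acc with
  | nil => simp
  | cons x t ih =>
    by_cases h : p x <;> simp [h, ih]

-- abbreviations used by the proof
def pvItem (srcs : List String) (k : String) : String × Int := (k, (srcs.count k : Int))

def pvLine (srcs : List String) (k : String) : String :=
  "  " ++ k ++ ": " ++ PySem.Int.toStr (srcs.count k : Int)

theorem pv_dict_eq (entries : List (List (String × String))) :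
    entries.foldl (fun d entry =>
        d.insert ((PySem.Dict.mk entry).getD "source" "")
          (d.getD ((PySem.Dict.mk entry).getD "source" "") 0 + 1)) PySem.Dict.empty
      = PySem.Dict.counter (entries.map (fun e => (PySem.Dict.mk e).getD "source" "")) := by
  rw [← PySem.Dict.foldl_insert_getD_add_one_eq_counter, List.foldl_map]

theorem pv_known_loop (srcs : List String) (init : List String) :
    KNOWN_SOURCES.foldl (fun ls src =>
        if (PySem.Dict.counter srcs).getD src 0 ≠ 0
        then ls ++ ["  " ++ src ++ ": " ++ PySem.Int.toStr ((PySem.Dict.counter srcs).getD src 0)]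
        else ls) init
      = init ++ (KNOWN_SOURCES.filter (fun s => srcs.contains s)).map (pvLine srcs) := by
  rw [foldl_append_ite (p := fun src => (PySem.Dict.counter srcs).getD src 0 ≠ 0)]
  congr 1
  have hg : ∀ s, (PySem.Dict.counter srcs).getD s 0 = (srcs.count s : Int) := fun s =>
    PySem.Dict.getD_counter srcs s
  have hpred : ∀ s ∈ KNOWN_SOURCES,
      decide ((PySem.Dict.counter srcs).getD s 0 ≠ 0) = srcs.contains s := by
    intro s _
    by_cases h : s ∈ srcs
    · have hc : srcs.count s ≠ 0 := (List.count_pos_iff.mpr h).ne'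
      simp [hg, h, Int.natCast_eq_zero, hc]
    · simp [hg, h, List.count_eq_zero.mpr h]
  rw [List.filter_congr hpred]
  apply List.map_congr_left
  intro s _
  simp [pvLine, hg]

theorem pv_sorted_items (srcs : List String) :
    PySem.List.sorted2 (PySem.Dict.counter srcs).items (fun it => it.1) (fun it => it.2)
      = (PySem.List.sorted (PySem.Set.ofList srcs) (fun x => x)).map (pvItem srcs) := by
  rw [sorted2_eq_sorted_lex]
  apply PySem.List.sorted_eq_of_perm_of_pairwise_lt
  · rw [PySem.Dict.items_counter]
    exact (PySem.List.sorted_perm _ _ false).map _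
  · rw [List.pairwise_map]
    simp only [pvItem]
    exact (PySem.List.sorted_ofList_pairwise_lt srcs).imp
      (fun h => Prod.Lex.toLex_lt_toLex.mpr (Or.inl h))

theorem pv_unknown_loop (srcs : List String) (init : List String) :
    ((PySem.List.sorted (PySem.Set.ofList srcs) (fun x => x)).map (pvItem srcs)).foldl
        (fun ls it =>
          if ¬ KNOWN_SOURCES.contains it.1 ∧ it.2 ≠ 0
          then ls ++ ["  " ++ it.1 ++ ": " ++ PySem.Int.toStr it.2] else ls) init
      = init ++ (((PySem.List.sorted (PySem.Set.ofList srcs) (fun x => x)).filter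
          (fun k => !KNOWN_SOURCES.contains k)).map (pvLine srcs)) := by
  rw [foldl_append_ite (p := fun it : String × Int => ¬ KNOWN_SOURCES.contains it.1 ∧ it.2 ≠ 0)]
  congr 1
  rw [List.filter_map, List.map_map]
  simp only [Function.comp_def]
  have hpred : ∀ k ∈ PySem.List.sorted (PySem.Set.ofList srcs) (fun x => x),
      (decide (¬ KNOWN_SOURCES.contains (pvItem srcs k).1 ∧ (pvItem srcs k).2 ≠ 0))
        = !KNOWN_SOURCES.contains k := by
    intro k hk
    have hk' : k ∈ srcs := by
      have := (PySem.List.mem_sorted _ _ _ _).mp hk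
      exact (PySem.Set.mem_ofList srcs k).mp this
    have hcnt : srcs.count k ≠ 0 := (List.count_pos_iff.mpr hk').ne'
    by_cases h : k ∈ KNOWN_SOURCES <;> simp [pvItem, h, Int.natCast_eq_zero, hcnt]
  rw [List.filter_congr hpred]
  apply List.map_congr_left
  intro k _
  simp [pvItem, pvLine]

theorem pv_rank_pairwise : KNOWN_SOURCES.Pairwise (fun a b => rankB a < rankB b) := by decide

theorem pv_rank_known_lt : ∀ x ∈ KNOWN_SOURCES, rankB x < (KNOWN_SOURCES.length : Int) := by decide

theorem pv_rank_unknown (k : String) (h : KNOWN_SOURCES.contains k = false) :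
    rankB k = (KNOWN_SOURCES.length : Int) := by
  have h' : k ∉ KNOWN_SOURCES := by simpa using h
  simp [rankB, h']

theorem pv_b_sorted (srcs : List String) :
    PySem.List.sorted2 (PySem.Dict.counter srcs).items (fun it => rankB it.1) (fun it => it.1)
      = (KNOWN_SOURCES.filter (fun s => srcs.contains s)).map (pvItem srcs)
        ++ ((PySem.List.sorted (PySem.Set.ofList srcs) (fun x => x)).filter
            (fun k => !KNOWN_SOURCES.contains k)).map (pvItem srcs) := by
  rw [sorted2_eq_sorted_lex]
  apply PySem.List.sorted_eq_of_perm_of_pairwise_lt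
  · rw [PySem.Dict.items_counter, ← List.map_append]
    apply List.Perm.map
    have h1 : ((PySem.List.sorted (PySem.Set.ofList srcs) (fun x => x)).filter
          (fun k => !KNOWN_SOURCES.contains k)).Perm
        ((PySem.Set.ofList srcs).filter (fun k => !KNOWN_SOURCES.contains k)) :=
      (PySem.List.sorted_perm _ _ false).filter _
    have h2 : (KNOWN_SOURCES.filter (fun s => srcs.contains s)).Perm
        ((PySem.Set.ofList srcs).filter (fun k => KNOWN_SOURCES.contains k)) := by
      apply (List.perm_ext_iff_of_nodup ((by decide : KNOWN_SOURCES.Nodup).filter _)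
        ((PySem.Set.nodup_ofList srcs).filter _)).mpr
      intro a
      simp [List.mem_filter, PySem.Set.mem_ofList]
      tauto
    exact (h2.append h1).trans (List.filter_append_perm _ _)
  · rw [← List.map_append, List.pairwise_map]
    simp only [pvItem]
    apply List.pairwise_append.mpr
    refine ⟨?_, ?_, ?_⟩
    · exact (pv_rank_pairwise.filter _).imp
        (fun h => Prod.Lex.toLex_lt_toLex.mpr (Or.inl h))
    · have hf := (PySem.List.sorted_ofList_pairwise_lt srcs).filter
        (fun k => !KNOWN_SOURCES.contains k)
      refine hf.imp_of_mem ?_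
      intro a b ha hb hab
      have ha' : KNOWN_SOURCES.contains a = false := by
        simpa using (List.mem_filter.mp ha).2
      have hb' : KNOWN_SOURCES.contains b = false := by
        simpa using (List.mem_filter.mp hb).2
      exact Prod.Lex.toLex_lt_toLex.mpr
        (Or.inr ⟨by rw [pv_rank_unknown a ha', pv_rank_unknown b hb'], hab⟩)
    · intro a ha b hb
      have ha' : a ∈ KNOWN_SOURCES := (List.mem_filter.mp ha).1
      have hb' : KNOWN_SOURCES.contains b = false := by
        simpa using (List.mem_filter.mp hb).2
      exact Prod.Lex.toLex_lt_toLex.mpr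
        (Or.inl (by rw [pv_rank_unknown b hb']; exact pv_rank_known_lt a ha'))

-- ===== VERDICT (by name: the statement is the Claim_ definition above) =====
theorem build_status_spec : Claim_equal_build_status := by
  intro entries _
  unfold Spec_build_status
  simp only [build_status, build_status_alt]
  rw [pv_dict_eq]
  rw [pv_known_loop, pv_sorted_items, pv_unknown_loop, pv_b_sorted]
  rw [List.map_append, List.map_map, List.map_map]
  unfold pvLine
  simp [pvItem, Function.comp_def]
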